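-- pv_equiv track=rewrite | github.com/warheart1984-ctrl/Aris- | evolving_ai/aris_runtime/bridge_intelligence.py | _infer_operation
-- ===== SOURCE A (Python) =====
-- def _infer_operation(intent: str, text: str) -> str:
--     normalized_text = text.lower()
--     if intent in {"inspect", "validation"}:
--         return "read" if intent == "inspect" else "compare"
--     if any(token in normalized_text for token in ("delete", "remove", "purge")):
--         return "delete"
--     if any(token in normalized_text for token in ("branch", "fork")):
--         return "branch"
--     if any(token in normalized_text for token in ("execute", "run", "launch")):
--         return "execute"
--     if any(token in normalized_text for token in ("create", "add")):
--         return "create"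
--     if any(token in normalized_text for token in ("update", "change", "modify", "patch", "fix", "refactor")):
--         return "update"
--     return "call"
-- ===== SOURCE B (Python) =====
-- _KEYWORDS = {
--     "delete": 0, "remove": 0, "purge": 0,
--     "branch": 1, "fork": 1,
--     "execute": 2, "run": 2, "launch": 2,
--     "create": 3, "add": 3,
--     "update": 4, "change": 4, "modify": 4, "patch": 4, "fix": 4, "refactor": 4,
-- }
-- _LABELS = ("delete", "branch", "execute", "create", "update", "call")
--
--
-- def _infer_operation(intent: str, text: str) -> str:
--     if intent == "inspect":
--         return "read"
--     if intent == "validation":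
--         return "compare"
--     low = text.lower()
--     best = 5
--     for i in range(len(low)):
--         for kw, pri in _KEYWORDS.items():
--             if pri < best and low.startswith(kw, i):
--                 best = pri
--     return _LABELS[best]
-- ===== Notes on version B (the rewrite author's own statement) =====
-- stated objective: alternative
-- what changed: Replaces A's ordered chain of any(substring) group tests with a single left-to-right scan over text positions that prefix-matches a flat keyword-to-priority map and keeps a running minimum priority, indexing a label table at the end (the intent guard stays as two early returns).
import Mathlib
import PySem

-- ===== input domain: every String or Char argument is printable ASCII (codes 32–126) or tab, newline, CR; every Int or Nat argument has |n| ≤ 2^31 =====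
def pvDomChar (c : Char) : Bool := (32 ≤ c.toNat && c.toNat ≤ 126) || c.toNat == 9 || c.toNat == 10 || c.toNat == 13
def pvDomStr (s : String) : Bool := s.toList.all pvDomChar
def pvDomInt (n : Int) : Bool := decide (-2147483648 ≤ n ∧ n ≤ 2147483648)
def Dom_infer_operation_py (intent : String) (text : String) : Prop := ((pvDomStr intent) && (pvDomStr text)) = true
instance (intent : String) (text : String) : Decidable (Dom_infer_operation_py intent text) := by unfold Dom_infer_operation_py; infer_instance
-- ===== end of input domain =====

-- ===== PORT A =====
-- Literal port of A's chain of intent guard + four any(token in text) group tests.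
def infer_operation_py (intent : String) (text : String) : String :=
  let normalized_text := PySem.Str.lower text
  if intent == "inspect" || intent == "validation" then
    (if intent == "inspect" then "read" else "compare")
  else if ["delete", "remove", "purge"].any (fun token => PySem.Str.isIn token normalized_text) then
    "delete"
  else if ["branch", "fork"].any (fun token => PySem.Str.isIn token normalized_text) then
    "branch"
  else if ["execute", "run", "launch"].any (fun token => PySem.Str.isIn token normalized_text) then
    "execute"
  else if ["create", "add"].any (fun token => PySem.Str.isIn token normalized_text) then
    "create"
  else if ["update", "change", "modify", "patch", "fix", "refactor"].any (fun token => PySem.Str.isIn token normalized_text) then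
    "update"
  else
    "call"

-- ===== PORT B =====
-- B: one left-to-right scan over text positions; each position prefix-matches a flat
-- keyword→priority map and keeps the running minimum priority; a label table is indexed at the end.
def pvKw : List (List Char × Nat) :=
  [ ("delete".toList, 0), ("remove".toList, 0), ("purge".toList, 0),
    ("branch".toList, 1), ("fork".toList, 1),
    ("execute".toList, 2), ("run".toList, 2), ("launch".toList, 2),
    ("create".toList, 3), ("add".toList, 3),
    ("update".toList, 4), ("change".toList, 4), ("modify".toList, 4),
    ("patch".toList, 4), ("fix".toList, 4), ("refactor".toList, 4) ]

def pvLabels : List String := ["delete", "branch", "execute", "create", "update", "call"]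

-- inner loop: one text position (the current suffix), all keywords
def pvStep (suffix : List Char) (best : Nat) : Nat :=
  pvKw.foldl (fun b kp => if kp.2 < b && kp.1.isPrefixOf suffix then kp.2 else b) best

-- outer loop over positions i = 0 .. len-1, i.e. the nonempty suffixes
def pvScan : List Char → Nat → Nat
  | [], best => best
  | c :: rest, best => pvScan rest (pvStep (c :: rest) best)

def infer_operation_py_alt (intent : String) (text : String) : String :=
  if intent == "inspect" then "read"
  else if intent == "validation" then "compare"
  else
    let low := (PySem.Str.lower text).toList
    pvLabels.getD (pvScan low 5) ""

-- ===== PRECONDITION & SPEC =====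
def Spec_infer_operation_py (intent : String) (text : String) (out : String) : Prop := out = infer_operation_py_alt intent text
instance (intent : String) (text : String) (out : String) : Decidable (Spec_infer_operation_py intent text out) := by unfold Spec_infer_operation_py; infer_instance

-- ===== CLAIM =====
def Claim_equal_infer_operation_py : Prop := ∀ (intent : String) (text : String), Dom_infer_operation_py intent text → Spec_infer_operation_py intent text (infer_operation_py intent text)

-- ===== LEMMAS AND PROOFS =====

-- min-form of the fold (the `kp.2 < b` test is just min)
def pvF (P : List Char × Nat → Bool) (ks : List (List Char × Nat)) (best : Nat) : Nat :=
  ks.foldl (fun b kp => if P kp then min b kp.2 else b) best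

theorem pvStep_eq (s : List Char) (best : Nat) :
    pvStep s best = pvF (fun kp => kp.1.isPrefixOf s) pvKw best := by
  unfold pvStep pvF
  generalize pvKw = ks
  induction ks generalizing best with
  | nil => rfl
  | cons kp ks ih =>
    simp only [List.foldl_cons, ih]
    congr 1
    by_cases hP : kp.1.isPrefixOf s <;> by_cases hlt : kp.2 < best <;>
      simp [hP, hlt] <;> omega

theorem pvF_min (P : List Char × Nat → Bool) (ks : List (List Char × Nat)) (x p : Nat) :
    pvF P ks (min x p) = min (pvF P ks x) p := by
  unfold pvF
  induction ks generalizing x with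
  | nil => rfl
  | cons kp ks ih =>
    simp only [List.foldl_cons]
    by_cases hP : P kp
    · simp only [hP, if_pos]
      rw [min_right_comm x p kp.2, ih]
    · simp [hP, ih]

-- splitting a disjunctive predicate into two sequential folds
theorem pvF_cons (P : List Char × Nat → Bool) (kp : List Char × Nat)
    (ks : List (List Char × Nat)) (b : Nat) :
    pvF P (kp :: ks) b = pvF P ks (if P kp then min b kp.2 else b) := rfl

theorem pvF_or (P Q R : List Char × Nat → Bool) (hR : ∀ kp, R kp = (P kp || Q kp))
    (ks : List (List Char × Nat)) (best : Nat) :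
    pvF R ks best = pvF Q ks (pvF P ks best) := by
  induction ks generalizing best with
  | nil => rfl
  | cons kp ks ih =>
    rw [pvF_cons R, pvF_cons Q, pvF_cons P, ih, hR]
    congr 1
    by_cases hP : P kp <;> by_cases hQ : Q kp <;>
      simp [hP, hQ, pvF_min]

theorem pvF_of_false (P : List Char × Nat → Bool) (ks : List (List Char × Nat))
    (hks : ∀ kp ∈ ks, P kp = false) (best : Nat) : pvF P ks best = best := by
  induction ks generalizing best with
  | nil => rfl
  | cons kp ks ih =>
    rw [pvF_cons, hks kp List.mem_cons_self]
    exact ih (fun x hx => hks x (List.mem_cons_of_mem _ hx)) best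

theorem pvIsIn_cons (sub : List Char) (c : Char) (t : List Char) :
    PySem.Chars.isIn sub (c :: t) = (sub.isPrefixOf (c :: t) || PySem.Chars.isIn sub t) := by
  by_cases h : sub <:+: (c :: t)
  · rw [(PySem.Chars.isIn_iff_infix sub (c :: t)).2 h]
    rcases List.infix_cons_iff.1 h with hp | hi
    · simp [List.isPrefixOf_iff_prefix, hp]
    · simp [(PySem.Chars.isIn_iff_infix sub t).2 hi]
  · rw [(PySem.Chars.isIn_eq_false_iff sub (c :: t)).2 h]
    rw [List.infix_cons_iff] at h
    rw [not_or] at h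
    have hp : sub.isPrefixOf (c :: t) = false := by
      rw [← Bool.not_eq_true, List.isPrefixOf_iff_prefix]; exact h.1
    simp [hp, (PySem.Chars.isIn_eq_false_iff sub t).2 h.2]

-- the scan computes the fold of substring matches over the whole keyword table
theorem pvScan_eq (l : List Char) (best : Nat) :
    pvScan l best = pvF (fun kp => PySem.Chars.isIn kp.1 l) pvKw best := by
  induction l generalizing best with
  | nil =>
    exact (pvF_of_false _ pvKw (by decide) best).symm
  | cons c rest ih =>
    show pvScan rest (pvStep (c :: rest) best) = _
    rw [ih, pvStep_eq]
    exact (pvF_or _ _ _ (fun kp => pvIsIn_cons kp.1 c rest) pvKw best).symm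

-- a fold over keywords of one shared priority collapses to the group's any-test
theorem pvF_const (P : List Char × Nat → Bool) (ks : List (List Char × Nat)) (p : Nat)
    (hp : ∀ kp ∈ ks, kp.2 = p) (best : Nat) :
    pvF P ks best = if ks.any P then min best p else best := by
  induction ks generalizing best with
  | nil => rfl
  | cons kp ks ih =>
    have hkp : kp.2 = p := hp kp (List.mem_cons_self)
    have hks : ∀ kp ∈ ks, kp.2 = p := fun x hx => hp x (List.mem_cons_of_mem _ hx)
    show pvF P ks (if P kp then min best kp.2 else best) = _
    by_cases hP : P kp
    · simp only [hP, if_pos, hkp, ih hks, List.any_cons, Bool.true_or]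
      by_cases h : ks.any P <;> simp [h]
    · rw [Bool.not_eq_true] at hP
      rw [ih hks, List.any_cons, hP, Bool.false_or]
      simp

-- bridge: String-level isIn is list-level isIn on toList
theorem pvIsIn_toList (sub s : String) :
    PySem.Str.isIn sub s = PySem.Chars.isIn sub.toList s.toList := by
  simp [PySem.Str.isIn]

-- ===== VERDICT =====
theorem infer_operation_py_spec : Claim_equal_infer_operation_py := by
  intro intent text _
  unfold Spec_infer_operation_py infer_operation_py infer_operation_py_alt
  by_cases h1 : intent == "inspect" <;> by_cases h2 : intent == "validation" <;>
    simp only [h1, h2, Bool.or_true, Bool.or_false, if_true] <;> try rfl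
  -- generic branch
  rw [pvScan_eq]
  have hsplit : pvKw = pvKw.take 3 ++ (pvKw.drop 3).take 2 ++ ((pvKw.drop 5).take 3
      ++ ((pvKw.drop 8).take 2 ++ (pvKw.drop 10))) := by rfl
  set l := (PySem.Str.lower text).toList with hl
  set P : List Char × Nat → Bool := fun kp => PySem.Chars.isIn kp.1 l with hP
  have happ : ∀ (ks₁ ks₂ : List (List Char × Nat)) (b : Nat),
      pvF P (ks₁ ++ ks₂) b = pvF P ks₂ (pvF P ks₁ b) := by
    intro ks₁ ks₂ b; unfold pvF; exact List.foldl_append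
  rw [hsplit, happ, happ, happ, happ]
  rw [pvF_const P _ 4 (by decide), pvF_const P _ 3 (by decide), pvF_const P _ 2 (by decide),
      pvF_const P _ 1 (by decide), pvF_const P _ 0 (by decide)]
  simp only [hP, pvKw, List.take, List.drop, List.any_cons, List.any_nil]
  simp only [pvIsIn_toList, hl]
  generalize (PySem.Chars.isIn "delete".toList (PySem.Str.lower text).toList
      || (PySem.Chars.isIn "remove".toList (PySem.Str.lower text).toList
      || (PySem.Chars.isIn "purge".toList (PySem.Str.lower text).toList || false))) = g0
  generalize (PySem.Chars.isIn "branch".toList (PySem.Str.lower text).toList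
      || (PySem.Chars.isIn "fork".toList (PySem.Str.lower text).toList || false)) = g1
  generalize (PySem.Chars.isIn "execute".toList (PySem.Str.lower text).toList
      || (PySem.Chars.isIn "run".toList (PySem.Str.lower text).toList
      || (PySem.Chars.isIn "launch".toList (PySem.Str.lower text).toList || false))) = g2
  generalize (PySem.Chars.isIn "create".toList (PySem.Str.lower text).toList
      || (PySem.Chars.isIn "add".toList (PySem.Str.lower text).toList || false)) = g3
  generalize (PySem.Chars.isIn "update".toList (PySem.Str.lower text).toList
      || (PySem.Chars.isIn "change".toList (PySem.Str.lower text).toList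
      || (PySem.Chars.isIn "modify".toList (PySem.Str.lower text).toList
      || (PySem.Chars.isIn "patch".toList (PySem.Str.lower text).toList
      || (PySem.Chars.isIn "fix".toList (PySem.Str.lower text).toList
      || (PySem.Chars.isIn "refactor".toList (PySem.Str.lower text).toList || false)))))) = g4
  cases g0 <;> cases g1 <;> cases g2 <;> cases g3 <;> cases g4 <;> decide
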